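-- pv_equiv track=rewrite | github.com/mdandre89/Codewars-exercises | word-to-initial-number/word-to-initial-number.py | convert
-- ===== SOURCE A (Python) =====
-- def convert(st):
--     if not st:
--         return 0
--     st = st.lower()
--     first_letter = st[0]
--     st = st.replace(first_letter, '1')
--     itera = iter(list('023456789'))
--     for i, value in enumerate(st):
--         if not st[i].isdigit():
--             st = st.replace(value, next(itera) )
--     return int(st)
-- ===== SOURCE B (Python) =====
-- def convert(st):
--     if not st:
--         return 0
--     st = st.lower()
--     first = st[0]
--     digits = '023456789'
--     mapping = {}
--     out = []
--     for ch in st: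
--         if ch == first:
--             out.append('1')
--         elif ch.isdigit():
--             out.append(ch)
--         elif ch in mapping:
--             out.append(mapping[ch])
--         else:
--             d = digits[len(mapping)]
--             mapping[ch] = d
--             out.append(d)
--     return int(''.join(out))
-- ===== Notes on version B (the rewrite author's own statement) =====
-- stated objective: idiomatic
-- what changed: Replaces A's repeated whole-string str.replace passes (driven by an index loop over a stale snapshot of the string) with a single left-to-right pass that builds the output via a first-occurrence char-to-digit dict.
import Mathlib
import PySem

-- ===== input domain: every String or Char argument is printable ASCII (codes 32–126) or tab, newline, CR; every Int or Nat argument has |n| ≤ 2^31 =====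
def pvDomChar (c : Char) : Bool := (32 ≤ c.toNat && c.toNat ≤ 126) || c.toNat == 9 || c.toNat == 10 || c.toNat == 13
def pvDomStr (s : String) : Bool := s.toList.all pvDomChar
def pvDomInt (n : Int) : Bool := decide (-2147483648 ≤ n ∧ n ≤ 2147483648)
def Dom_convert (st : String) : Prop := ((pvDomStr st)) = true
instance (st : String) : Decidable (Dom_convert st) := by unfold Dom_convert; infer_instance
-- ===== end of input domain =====

-- B replaces A's repeated whole-string str.replace passes by one pass with a first-occurrence
-- char→digit dictionary (objective: idiomatic; same asymptotic cost).

-- shared constant: the digit pool '023456789' (iter(list('023456789')) in A, digits in B)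
def DIGS : List Char := ['0', '2', '3', '4', '5', '6', '7', '8', '9']

-- ===== PORT A =====
-- A's loop body: 'for i, value in enumerate(st): if not st[i].isdigit(): st = st.replace(value, next(itera))'
-- (enumerate iterates the snapshot of st taken at loop entry; 'none' models StopIteration from next()).
def stepA (acc : Option (List Char × List Char)) (p : Int × Char) : Option (List Char × List Char) :=
  match acc with
  | none => none
  | some (cur, digs) =>
    if !(PySem.Chars.isdigit (PySem.List.pyGetD cur p.1 ' ')) then
      match digs with
      | [] => none
      | d :: rest => some (PySem.Chars.replace cur [p.2] [d], rest)
    else some (cur, digs)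

def convert (st : String) : Int :=
  if st.toList.isEmpty then 0
  else
    let cs := PySem.Chars.lower st.toList
    let first := (PySem.List.pyGet? cs 0).getD ' '
    let cs1 := PySem.Chars.replace cs [first] ['1']
    match (PySem.List.enumerate cs1 0).foldl stepA (some (cs1, DIGS)) with
    | none => 0
    | some (cur, _) => (PySem.Int.ofChars? cur).getD 0

-- ===== PORT B =====
-- B's loop body: append '1' / the digit itself / the mapped digit / a fresh digit keyed in the dict
-- ('none' models the IndexError of digits[len(mapping)] when the digits run out).
def stepB (first : Char) (acc : Option (PySem.Dict Char Char × List Char)) (ch : Char) :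
    Option (PySem.Dict Char Char × List Char) :=
  match acc with
  | none => none
  | some (m, out) =>
    if ch = first then some (m, out ++ ['1'])
    else if PySem.Chars.isdigit ch then some (m, out ++ [ch])
    else
      match PySem.Dict.get? m ch with
      | some d => some (m, out ++ [d])
      | none =>
        match PySem.List.pyGet? DIGS ((PySem.Dict.size m : Int)) with
        | none => none
        | some d => some (PySem.Dict.insert m ch d, out ++ [d])

def convert_alt (st : String) : Int :=
  if st.toList.isEmpty then 0
  else
    let cs := PySem.Chars.lower st.toList
    let first := (PySem.List.pyGet? cs 0).getD ' '
    match cs.foldl (stepB first) (some ((PySem.Dict.empty : PySem.Dict Char Char), ([] : List Char))) with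
    | none => 0
    | some (_, out) => (PySem.Int.ofChars? out).getD 0

-- ===== PRECONDITION & SPEC =====
-- Pre_ excludes exactly the inputs on which Python A raises StopIteration: lowercased strings with
-- ten or more distinct non-digit characters other than the first character.
def Pre_convert (st : String) : Prop :=
  ((PySem.Chars.lower st.toList).filter
      (fun c => !(PySem.Chars.isdigit c) &&
        !(c == (PySem.List.pyGet? (PySem.Chars.lower st.toList) 0).getD ' '))).dedup.length ≤ 9
instance (st : String) : Decidable (Pre_convert st) := by unfold Pre_convert; infer_instance

def pvWitness_convert : String := "hello world"

def Spec_convert (st : String) (out : Int) : Prop := out = convert_alt st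
instance (st : String) (out : Int) : Decidable (Spec_convert st out) := by unfold Spec_convert; infer_instance

-- ===== CLAIM (what is proved, stated in full; the proofs are below) =====
def Claim_equal_convert : Prop := ∀ (st : String), Dom_convert st → Pre_convert st → Spec_convert st (convert st)

-- ===== LEMMAS AND PROOFS =====

def repl (first c : Char) : Char := if c = first then '1' else c

def subst (m : PySem.Dict Char Char) (c : Char) : Char := (PySem.Dict.get? m c).getD c

def InvM (m : PySem.Dict Char Char) : Prop :=
  (PySem.Dict.keys m).Nodup ∧
  ∀ p ∈ (PySem.Dict.items m), PySem.Chars.isdigit p.1 = false ∧ PySem.Chars.isdigit p.2 = true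

-- single-character replace is a pointwise map
lemma replace_go_single (a b : Char) :
    ∀ (l acc : List Char) (fuel : Nat), l.length ≤ fuel →
      PySem.Chars.replace.go [a] [b] fuel l acc
        = acc.reverse ++ l.map (fun c => if c = a then b else c) := by
  intro l
  induction l with
  | nil =>
    intro acc fuel _
    cases fuel <;> simp [PySem.Chars.replace.go]
  | cons c t ih =>
    intro acc fuel hf
    cases fuel with
    | zero => simp at hf
    | succ f =>
      by_cases hca : c = a
      · subst hca
        simp [PySem.Chars.replace.go, List.isPrefixOf, ih (b :: acc) f (by simpa using hf)]
      · simp [PySem.Chars.replace.go, List.isPrefixOf, hca,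
          ih (c :: acc) f (by simpa using hf), Ne.symm hca]

lemma replace_single (s : List Char) (a b : Char) :
    PySem.Chars.replace s [a] [b] = s.map (fun c => if c = a then b else c) := by
  simpa using replace_go_single a b s [] s.length le_rfl

lemma foldl_stepA_none (L : List (Int × Char)) : L.foldl stepA none = none := by
  induction L with
  | nil => rfl
  | cons p L ih => simpa [stepA] using ih

lemma get?_none_of_digit (m : PySem.Dict Char Char) (hm : InvM m) (c : Char)
    (hc : PySem.Chars.isdigit c = true) : PySem.Dict.get? m c = none := by
  cases h : PySem.Dict.get? m c with
  | none => rfl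
  | some v =>
    have h1 := (hm.2 (c, v) (PySem.Dict.mem_items_of_get?_eq_some _ h)).1
    exact absurd hc (by simp [h1])

lemma subst_digit (m : PySem.Dict Char Char) (hm : InvM m) (c : Char)
    (hc : PySem.Chars.isdigit c = true) : subst m c = c := by
  simp [subst, get?_none_of_digit m hm c hc]

lemma foldl_stepB_none (first : Char) (L : List Char) : L.foldl (stepB first) none = none := by
  induction L with
  | nil => rfl
  | cons c L ih => simpa [stepB] using ih

lemma digit_of_mem_DIGS : ∀ x ∈ DIGS, PySem.Chars.isdigit x = true := by
  intro x hx
  simp only [DIGS, List.mem_cons, List.not_mem_nil, or_false] at hx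
  rcases hx with rfl | rfl | rfl | rfl | rfl | rfl | rfl | rfl | rfl <;> decide

lemma size_insert_fresh (m : PySem.Dict Char Char) (c d : Char)
    (h : PySem.Dict.get? m c = none) :
    PySem.Dict.size (PySem.Dict.insert m c d) = PySem.Dict.size m + 1 := by
  have hc : PySem.Dict.contains m c = false := by
    rw [PySem.Dict.contains_eq_isSome_get?, h]
    rfl
  simp [PySem.Dict.size, PySem.Dict.items_insert_of_not_contains m d hc]

lemma InvM_insert (m : PySem.Dict Char Char) (c d : Char) (hm : InvM m)
    (hc : PySem.Chars.isdigit c = false) (hd : PySem.Chars.isdigit d = true) :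
    InvM (PySem.Dict.insert m c d) := by
  constructor
  · exact PySem.Dict.nodup_keys_insert m c d hm.1
  · intro p hp
    rcases (PySem.Dict.mem_items_insert m c d p).1 hp with h | h
    · subst h; exact ⟨hc, hd⟩
    · exact hm.2 p h.1

lemma subst_insert_point (m : PySem.Dict Char Char) (hm : InvM m) (c d : Char)
    (hc : PySem.Chars.isdigit c = false) (h : PySem.Dict.get? m c = none) (y : Char) :
    (if subst m y = c then d else subst m y) = subst (PySem.Dict.insert m c d) y := by
  by_cases hyc : y = c
  · subst hyc
    simp [subst, h, PySem.Dict.get?_insert_self]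
  · have hne : subst m y ≠ c := by
      cases hy : PySem.Dict.get? m y with
      | none => simpa [subst, hy] using hyc
      | some v =>
        have hv := (hm.2 (y, v) (PySem.Dict.mem_items_of_get?_eq_some _ hy)).2
        simp only [subst, hy, Option.getD_some]
        intro hvc; subst hvc; rw [hv] at hc; exact absurd hc (by simp)
    rw [subst, subst, PySem.Dict.get?_insert_of_ne m d hyc]
    exact if_neg (by simpa [subst] using hne)

lemma main_loop (first : Char) :
    ∀ (rest : List Char) (m : PySem.Dict Char Char) (out : List Char),
      InvM m → (∀ x ∈ out, PySem.Chars.isdigit x = true) →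
      (PySem.List.enumerate (rest.map (repl first)) (out.length : Int)).foldl stepA
          (some (out ++ (rest.map (repl first)).map (subst m), DIGS.drop (PySem.Dict.size m)))
      = (match rest.foldl (stepB first) (some (m, out)) with
         | none => none
         | some (m', out') => some (out', DIGS.drop (PySem.Dict.size m'))) := by
  intro rest
  induction rest with
  | nil =>
    intro m out hm hout
    simp
  | cons c rest ih =>
    intro m out hm hout
    simp only [List.map_cons, PySem.List.enumerate_cons, List.foldl_cons]
    by_cases hcf : c = first
    · -- first letter: already replaced by the digit '1'
      have hr : repl first c = '1' := by simp [repl, hcf]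
      have hs : subst m '1' = '1' := subst_digit m hm '1' (by decide)
      rw [hr, hs]
      have hA : stepA (some (out ++ '1' :: ((rest.map (repl first)).map (subst m)),
            DIGS.drop (PySem.Dict.size m))) ((out.length : Int), '1')
          = some (out ++ '1' :: ((rest.map (repl first)).map (subst m)),
            DIGS.drop (PySem.Dict.size m)) := by
        simp [stepA, (by decide : PySem.Chars.isdigit '1' = true)]
      have hB : stepB first (some (m, out)) c = some (m, out ++ ['1']) := by
        simp [stepB, hcf]
      rw [hA, hB, List.append_cons,
        show ((out.length : Int) + 1) = (((out ++ ['1']).length : Nat) : Int) by simp]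
      exact ih m (out ++ ['1']) hm (by
        intro x hx
        rcases List.mem_append.1 hx with h | h
        · exact hout x h
        · simp at h; subst h; decide)
    · by_cases hd : PySem.Chars.isdigit c = true
      · -- a digit other than the first letter: passes through
        have hr : repl first c = c := by simp [repl, hcf]
        have hs : subst m c = c := subst_digit m hm c hd
        rw [hr, hs]
        have hA : stepA (some (out ++ c :: ((rest.map (repl first)).map (subst m)),
              DIGS.drop (PySem.Dict.size m))) ((out.length : Int), c)
            = some (out ++ c :: ((rest.map (repl first)).map (subst m)),
              DIGS.drop (PySem.Dict.size m)) := by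
          simp [stepA, hd]
        have hB : stepB first (some (m, out)) c = some (m, out ++ [c]) := by
          simp [stepB, hcf, hd]
        rw [hA, hB, List.append_cons,
          show ((out.length : Int) + 1) = (((out ++ [c]).length : Nat) : Int) by simp]
        exact ih m (out ++ [c]) hm (by
          intro x hx
          rcases List.mem_append.1 hx with h | h
          · exact hout x h
          · simp at h; subst h; exact hd)
      · have hd' : PySem.Chars.isdigit c = false := by simpa using hd
        have hr : repl first c = c := by simp [repl, hcf]
        rw [hr]
        cases hmc : PySem.Dict.get? m c with
        | some dv =>
          -- already assigned: its digit stands at this position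
          have hs : subst m c = dv := by simp [subst, hmc]
          have hdv : PySem.Chars.isdigit dv = true :=
            (hm.2 (c, dv) (PySem.Dict.mem_items_of_get?_eq_some _ hmc)).2
          rw [hs]
          have hA : stepA (some (out ++ dv :: ((rest.map (repl first)).map (subst m)),
                DIGS.drop (PySem.Dict.size m))) ((out.length : Int), c)
              = some (out ++ dv :: ((rest.map (repl first)).map (subst m)),
                DIGS.drop (PySem.Dict.size m)) := by
            simp [stepA, hdv]
          have hB : stepB first (some (m, out)) c = some (m, out ++ [dv]) := by
            simp [stepB, hcf, hd', hmc]
          rw [hA, hB, List.append_cons,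
            show ((out.length : Int) + 1) = (((out ++ [dv]).length : Nat) : Int) by simp]
          exact ih m (out ++ [dv]) hm (by
            intro x hx
            rcases List.mem_append.1 hx with h | h
            · exact hout x h
            · simp at h; subst h; exact hdv)
        | none =>
          -- fresh character: gets the next digit (or the digits run out)
          have hs : subst m c = c := by simp [subst, hmc]
          rw [hs]
          by_cases h9 : PySem.Dict.size m < 9
          · have hlt : PySem.Dict.size m < DIGS.length := by simpa [DIGS] using h9
            have hdrop : DIGS.drop (PySem.Dict.size m)
                = DIGS[PySem.Dict.size m] :: DIGS.drop (PySem.Dict.size m + 1) :=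
              List.drop_eq_getElem_cons hlt
            have hdig : PySem.Chars.isdigit (DIGS[PySem.Dict.size m]'hlt) = true :=
              digit_of_mem_DIGS _ (List.getElem_mem hlt)
            have hA : stepA (some (out ++ c :: ((rest.map (repl first)).map (subst m)),
                  DIGS.drop (PySem.Dict.size m))) ((out.length : Int), c)
                = some (PySem.Chars.replace
                    (out ++ c :: ((rest.map (repl first)).map (subst m))) [c]
                    [DIGS[PySem.Dict.size m]'hlt],
                  DIGS.drop (PySem.Dict.size m + 1)) := by
              rw [hdrop]
              simp [stepA, hd']
            have hkey : PySem.Chars.replace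
                  (out ++ c :: ((rest.map (repl first)).map (subst m))) [c]
                  [DIGS[PySem.Dict.size m]'hlt]
                = (out ++ [DIGS[PySem.Dict.size m]'hlt]) ++
                  ((rest.map (repl first)).map
                    (subst (PySem.Dict.insert m c (DIGS[PySem.Dict.size m]'hlt)))) := by
              rw [replace_single, List.map_append, List.map_cons, if_pos rfl,
                List.map_map, ← List.append_cons]
              congr 1
              · conv_rhs => rw [← List.map_id out]
                refine List.map_congr_left (fun x hx => ?_)
                have hxd := hout x hx
                have hxc : x ≠ c := fun e => by rw [e, hd'] at hxd; exact absurd hxd (by simp)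
                simp [hxc]
              · congr 1
                exact List.map_congr_left fun y _ => subst_insert_point m hm c _ hd' hmc y
            have hB : stepB first (some (m, out)) c
                = some (PySem.Dict.insert m c (DIGS[PySem.Dict.size m]'hlt),
                    out ++ [DIGS[PySem.Dict.size m]'hlt]) := by
              simp only [stepB, hd', hmc, if_neg hcf]
              rw [PySem.List.pyGet?_natCast, List.getElem?_eq_getElem hlt]
              simp
            have hsize : PySem.Dict.size (PySem.Dict.insert m c (DIGS[PySem.Dict.size m]'hlt))
                = PySem.Dict.size m + 1 := size_insert_fresh m c _ hmc
            rw [hA, hkey, hB,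
              show ((out.length : Int) + 1)
                  = (((out ++ [DIGS[PySem.Dict.size m]'hlt]).length : Nat) : Int) by simp,
              show DIGS.drop (PySem.Dict.size m + 1)
                  = DIGS.drop (PySem.Dict.size
                      (PySem.Dict.insert m c (DIGS[PySem.Dict.size m]'hlt))) by rw [hsize]]
            exact ih (PySem.Dict.insert m c (DIGS[PySem.Dict.size m]'hlt))
              (out ++ [DIGS[PySem.Dict.size m]'hlt])
              (InvM_insert m c _ hm hd' hdig)
              (by
                intro x hx
                rcases List.mem_append.1 hx with h | h
                · exact hout x h
                · simp at h; subst h; exact hdig)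
          · -- the digits are exhausted: StopIteration in A, IndexError in B
            have h9' : DIGS.length ≤ PySem.Dict.size m := by
              simp only [DIGS, List.length_cons, List.length_nil]; omega
            have hdrop : DIGS.drop (PySem.Dict.size m) = [] := List.drop_eq_nil_of_le h9'
            have hA : stepA (some (out ++ c :: ((rest.map (repl first)).map (subst m)),
                  DIGS.drop (PySem.Dict.size m))) ((out.length : Int), c) = none := by
              rw [hdrop]
              simp [stepA, hd']
            have hB : stepB first (some (m, out)) c = none := by
              simp only [stepB, hd', hmc, if_neg hcf]
              rw [PySem.List.pyGet?_natCast, List.getElem?_eq_none h9']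
              simp
            rw [hA, hB, foldl_stepA_none, foldl_stepB_none]

-- ===== VERDICT (by name: the statement is the Claim_ definition above) =====
lemma InvM_empty : InvM (PySem.Dict.empty : PySem.Dict Char Char) := by
  refine ⟨PySem.Dict.nodup_keys_empty, ?_⟩
  intro p hp
  simp [PySem.Dict.empty] at hp

lemma subst_empty (L : List Char) :
    L.map (subst (PySem.Dict.empty : PySem.Dict Char Char)) = L := by
  conv_rhs => rw [← List.map_id L]
  exact List.map_congr_left fun x _ => by simp [subst, PySem.Dict.get?_empty]

theorem convert_spec : Claim_equal_convert := by
  intro st hdom hpre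
  unfold Spec_convert convert convert_alt
  by_cases h : st.toList.isEmpty
  · rw [if_pos h, if_pos h]
  · rw [if_neg h, if_neg h]
    dsimp only
    have hml := main_loop ((PySem.List.pyGet? (PySem.Chars.lower st.toList) 0).getD ' ')
      (PySem.Chars.lower st.toList) PySem.Dict.empty [] InvM_empty (by simp)
    rw [subst_empty, PySem.Dict.size_empty, List.drop_zero] at hml
    simp only [List.nil_append, List.length_nil, Nat.cast_zero] at hml
    rw [replace_single,
      show (fun c => if c = (PySem.List.pyGet? (PySem.Chars.lower st.toList) 0).getD ' '
          then '1' else c)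
        = repl ((PySem.List.pyGet? (PySem.Chars.lower st.toList) 0).getD ' ') from rfl,
      hml]
    cases List.foldl (stepB ((PySem.List.pyGet? (PySem.Chars.lower st.toList) 0).getD ' '))
        (some ((PySem.Dict.empty : PySem.Dict Char Char), ([] : List Char)))
        (PySem.Chars.lower st.toList) with
    | none => rfl
    | some p => rfl
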